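-- pv_equiv track=rewrite | github.com/adusa1019/atcoder | ABC083/D.py | solve
-- ===== SOURCE A (Python) =====
-- def solve(string):
--     l = [s == "1" for s in string]
--     l_r = l[::-1]
--     index = 0
--     h = len(string) // 2
--     for i, (c, n, c_r, n_r) in enumerate(zip(l[:h], l[1:h + 1], l_r[:h], l_r[1:h + 1])):
--         if c ^ n or c_r ^ n_r:
--             index = i + 1
--     return str(len(string) - index)
-- ===== SOURCE B (Python) =====
-- def solve(string):
--     l = [s == "1" for s in string]
--     n = len(l)
--     index = 0
--     for j in range(n - 1):
--         if l[j] != l[j + 1]: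
--             index = max(index, min(j + 1, n - 1 - j))
--     return str(n - index)
-- ===== Notes on version B (the rewrite author's own statement) =====
-- stated objective: simpler
-- what changed: Replaces A's reversed-copy build and four-way zip over the two string halves with one plain pass over adjacent pairs that maximizes the nearest-end distance min(j+1, n-1-j) of each transition.
import Mathlib
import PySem

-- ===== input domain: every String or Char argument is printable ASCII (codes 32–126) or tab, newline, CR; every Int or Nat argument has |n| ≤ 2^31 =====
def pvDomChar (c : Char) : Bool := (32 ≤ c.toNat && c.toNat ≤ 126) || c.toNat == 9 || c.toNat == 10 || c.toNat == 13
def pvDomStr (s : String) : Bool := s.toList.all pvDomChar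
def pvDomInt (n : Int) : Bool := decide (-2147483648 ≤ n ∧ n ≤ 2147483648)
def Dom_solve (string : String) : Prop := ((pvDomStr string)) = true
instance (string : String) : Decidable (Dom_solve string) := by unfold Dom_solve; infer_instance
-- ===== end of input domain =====

-- B replaces A's reversed-copy build and four-way half-zip with a single pass over
-- adjacent pairs maximizing the nearest-end distance of each transition (simpler; same O(n)).

-- ===== PORT A =====
def solve (string : String) : String :=
  let l : List Bool := string.toList.map (fun s => s == '1')
  let l_r : List Bool := (PySem.List.slice? l none none (-1)).getD []
  let h : Int := PySem.Int.floordiv (PySem.Str.len string) 2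
  let z : List ((Bool × Bool) × (Bool × Bool)) :=
    ((PySem.List.slice l none (some h)).zip (PySem.List.slice l (some 1) (some (h + 1)))).zip
      ((PySem.List.slice l_r none (some h)).zip (PySem.List.slice l_r (some 1) (some (h + 1))))
  let index : Int :=
    (PySem.List.enumerate z 0).foldl
      (fun idx p =>
        if xor p.2.1.1 p.2.1.2 || xor p.2.2.1 p.2.2.2 then p.1 + 1 else idx) 0
  PySem.Int.toStr (PySem.Str.len string - index)

-- ===== PORT B =====
def solve_alt (string : String) : String :=
  let l : List Bool := string.toList.map (fun s => s == '1')
  let n : Int := l.length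
  let index : Int :=
    (PySem.List.pyRange 0 (n - 1) 1).foldl
      (fun idx j =>
        if PySem.List.pyGetD l j false != PySem.List.pyGetD l (j + 1) false then
          max idx (min (j + 1) (n - 1 - j))
        else idx) 0
  PySem.Int.toStr (n - index)

-- ===== PRECONDITION & SPEC =====
def Spec_solve (string : String) (out : String) : Prop := out = solve_alt string
instance (string : String) (out : String) : Decidable (Spec_solve string out) := by unfold Spec_solve; infer_instance

-- ===== CLAIM (what is proved, stated in full; the proofs are below) =====
def Claim_equal_solve : Prop := ∀ (string : String), Dom_solve string → Spec_solve string (solve string)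

-- ===== LEMMAS AND PROOFS =====

-- transition test between positions j and j+1
def tB (l : List Bool) (j : Nat) : Bool := l.getD j false != l.getD (j + 1) false

-- running max over range r of a score c
def Mx (c : Nat → Int) (r : Nat) : Int := (List.range r).foldl (fun a i => max a (c i)) 0

theorem Mx_nonneg (c : Nat → Int) (r : Nat) : 0 ≤ Mx c r :=
  (PySem.List.le_foldl_max_int (List.range r) c 0).1

theorem le_Mx (c : Nat → Int) (r i : Nat) (hi : i < r) : c i ≤ Mx c r :=
  (PySem.List.le_foldl_max_int (List.range r) c 0).2 i (List.mem_range.mpr hi)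

theorem Mx_le (c : Nat → Int) (r : Nat) (B : Int) (hB : 0 ≤ B)
    (h : ∀ i, i < r → c i ≤ B) : Mx c r ≤ B := by
  induction r with
  | zero => simpa [Mx] using hB
  | succ r ih =>
    have ih' := ih (fun i hi => h i (Nat.lt_succ_of_lt hi))
    simp only [Mx, List.range_succ, List.foldl_append, List.foldl_cons, List.foldl_nil] at *
    exact max_le ih' (h r (Nat.lt_succ_self r))

theorem lastupd_eq_Mx (P : Nat → Bool) (r : Nat) :
    (List.range r).foldl (fun idx i => if P i then (i : Int) + 1 else idx) 0
      = Mx (fun i => if P i then (i : Int) + 1 else 0) r := by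
  induction r with
  | zero => rfl
  | succ r ih =>
    simp only [Mx, List.range_succ, List.foldl_append, List.foldl_cons, List.foldl_nil] at *
    rw [ih]
    by_cases hP : P r
    · have hle : Mx (fun i => if P i then (i : Int) + 1 else 0) r ≤ (r : Int) + 1 := by
        apply Mx_le _ _ _ (by positivity)
        intro i hi
        split
        · exact_mod_cast by omega
        · positivity
      simp only [hP, if_pos]
      exact (max_eq_right hle).symm
    · simp only [hP, Bool.false_eq_true, if_false]
      exact (max_eq_left (Mx_nonneg _ r)).symm

theorem maxupd_eq_Mx (P : Nat → Bool) (v : Nat → Int) (r : Nat) :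
    (List.range r).foldl (fun idx j => if P j then max idx (v j) else idx) 0
      = Mx (fun j => if P j then v j else 0) r := by
  induction r with
  | zero => rfl
  | succ r ih =>
    simp only [Mx, List.range_succ, List.foldl_append, List.foldl_cons, List.foldl_nil] at *
    rw [ih]
    by_cases hP : P r
    · simp only [hP, if_pos]
    · simp only [hP, Bool.false_eq_true, if_false]
      exact (max_eq_left (Mx_nonneg (fun j => if P j then v j else 0) r)).symm

-- the core combinatorial fact: A's half-scan max equals B's nearest-end-distance max
theorem core_eq (l : List Bool) :
    Mx (fun i => if (tB l i || tB l (l.length - 2 - i)) then (i : Int) + 1 else 0)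
       (min (l.length / 2) (l.length - 1))
      = Mx (fun j => if tB l j then ((min (j + 1) (l.length - 1 - j) : Nat) : Int) else 0)
          (l.length - 1) := by
  set m := l.length with hm
  set k := min (m / 2) (m - 1) with hk
  apply le_antisymm
  · apply Mx_le _ _ _ (Mx_nonneg _ _)
    intro i hi
    by_cases hP : (tB l i || tB l (m - 2 - i)) = true
    swap
    · simp only [hP]; simp [Mx_nonneg]
    simp only [hP, if_pos]
    rcases Bool.or_eq_true_iff.mp hP with ht | ht
    · have hlt : i < m - 1 := by omega
      have := le_Mx (fun j => if tB l j then ((min (j + 1) (m - 1 - j) : Nat) : Int) else 0)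
        (m - 1) i hlt
      simp only [ht, if_pos] at this
      have hmin : min (i + 1) (m - 1 - i) = i + 1 := by omega
      rw [hmin] at this
      exact_mod_cast this
    · have hlt : m - 2 - i < m - 1 := by omega
      have := le_Mx (fun j => if tB l j then ((min (j + 1) (m - 1 - j) : Nat) : Int) else 0)
        (m - 1) (m - 2 - i) hlt
      simp only [ht, if_pos] at this
      have hmin : min (m - 2 - i + 1) (m - 1 - (m - 2 - i)) = i + 1 := by omega
      rw [hmin] at this
      exact_mod_cast this
  · apply Mx_le _ _ _ (Mx_nonneg _ _)
    intro j hj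
    by_cases ht : tB l j = true
    swap
    · simp only [ht]; simp [Mx_nonneg]
    simp only [ht, if_pos]
    by_cases hcase : j < m / 2
    · have hik : j < k := by omega
      have := le_Mx (fun i => if (tB l i || tB l (m - 2 - i)) then (i : Int) + 1 else 0) k j hik
      simp only [ht, Bool.true_or, if_pos] at this
      calc ((min (j + 1) (m - 1 - j) : Nat) : Int) ≤ ((j + 1 : Nat) : Int) := by exact_mod_cast by omega
        _ ≤ _ := by exact_mod_cast this
    · have hik : m - 2 - j < k := by omega
      have hj2 : m - 2 - (m - 2 - j) = j := by omega
      have := le_Mx (fun i => if (tB l i || tB l (m - 2 - i)) then (i : Int) + 1 else 0) k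
        (m - 2 - j) hik
      simp only [hj2, ht, Bool.or_true, if_pos] at this
      calc ((min (j + 1) (m - 1 - j) : Nat) : Int) ≤ ((m - 2 - j + 1 : Nat) : Int) := by
            exact_mod_cast by omega
        _ ≤ _ := by exact_mod_cast this

theorem xor_eq_bne (a b : Bool) : xor a b = (a != b) := by cases a <;> cases b <;> rfl

theorem solve_eq (s : String) :
    solve s = PySem.Int.toStr ((s.toList.length : Int) -
      Mx (fun i => if (tB (s.toList.map (fun c => c == '1')) i
            || tB (s.toList.map (fun c => c == '1')) (s.toList.length - 2 - i))
          then (i : Int) + 1 else 0)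
        (min (s.toList.length / 2) (s.toList.length - 1))) := by
  simp only [solve, PySem.Str.len_eq, PySem.List.slice?_none_none_neg_one, Option.getD_some]
  set cs := s.toList.map (fun c => c == '1') with hcs
  set m := s.toList.length with hm
  set k := min (m / 2) (m - 1) with hk
  have hcsl : cs.length = m := by simp [hcs, hm]
  -- h = m / 2
  have hfd : PySem.Int.floordiv ((m : Nat) : Int) 2 = ((m / 2 : Nat) : Int) := by
    rw [PySem.Int.floordiv_eq_ediv_of_pos (by omega)]; omega
  rw [hfd]
  -- the four slices
  have hs1 : PySem.List.slice cs none (some ((m / 2 : Nat) : Int)) = cs.take (m / 2) :=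
    PySem.List.slice_to_natCast cs (m / 2)
  have hs1r : PySem.List.slice cs.reverse none (some ((m / 2 : Nat) : Int))
      = cs.reverse.take (m / 2) := PySem.List.slice_to_natCast cs.reverse (m / 2)
  have htn1 : (((m / 2 : Nat) : Int) + 1).toNat = m / 2 + 1 := by omega
  have hs2 : PySem.List.slice cs (some 1) (some (((m / 2 : Nat) : Int) + 1))
      = (cs.drop 1).take (m / 2) := by
    rw [PySem.List.slice_toNat cs (by omega) (by omega), htn1]; norm_num
  have hs2r : PySem.List.slice cs.reverse (some 1) (some (((m / 2 : Nat) : Int) + 1))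
      = (cs.reverse.drop 1).take (m / 2) := by
    rw [PySem.List.slice_toNat cs.reverse (by omega) (by omega), htn1]; norm_num
  rw [hs1, hs1r, hs2, hs2r]
  set z : List ((Bool × Bool) × (Bool × Bool)) :=
    ((cs.take (m / 2)).zip ((cs.drop 1).take (m / 2))).zip
      ((cs.reverse.take (m / 2)).zip ((cs.reverse.drop 1).take (m / 2))) with hz
  have hzlen : z.length = k := by
    simp only [hz, List.length_zip, List.length_take, List.length_drop,
      List.length_reverse, hcsl, hk]
    omega
  rw [PySem.List.enumerate_eq_map_pyRange z ((false, false), (false, false)),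
    List.foldl_map]
  have hlenz : PySem.List.len z = ((z.length : Nat) : Int) := rfl
  rw [hlenz, PySem.List.pyRange_one, List.foldl_map]
  have htn2 : (((z.length : Nat) : Int) - 0).toNat = z.length := by omega
  rw [htn2, hzlen]
  congr 2
  rw [PySem.List.foldl_congr_mem (g := fun idx (i : Nat) =>
    if (tB cs i || tB cs (m - 2 - i)) then (i : Int) + 1 else idx)]
  · exact lastupd_eq_Mx _ k
  · intro acc i hi
    have hik : i < k := List.mem_range.mp hi
    have him : i < z.length := by omega
    have h0 : (0 : Int) + (i : Int) = ((i : Nat) : Int) := by omega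
    simp only [h0, PySem.List.pyGetD_natCast]
    rw [List.getD_eq_getElem z _ him]
    have hi1 : i < m - 1 := by omega
    have hi2 : i ≤ m - 2 := by omega
    simp only [hz, List.getElem_zip, List.getElem_take, List.getElem_drop,
      List.getElem_reverse]
    have e3 : (1 : Nat) + i = i + 1 := by omega
    have e1 : cs.length - 1 - i = m - 1 - i := by omega
    have e2 : cs.length - 1 - (i + 1) = m - 2 - i := by omega
    simp only [e3, e1, e2]
    have e4 : m - 2 - i + 1 = m - 1 - i := by omega
    simp only [tB, e4]
    rw [List.getD_eq_getElem cs false (show i < cs.length by omega),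
      List.getD_eq_getElem cs false (show i + 1 < cs.length by omega),
      List.getD_eq_getElem cs false (show m - 2 - i < cs.length by omega),
      List.getD_eq_getElem cs false (show m - 1 - i < cs.length by omega)]
    simp only [xor_eq_bne]
    cases hx : cs[m - 1 - i]'(by omega) <;> cases hy : cs[m - 2 - i]'(by omega) <;> simp

theorem solve_alt_eq (s : String) :
    solve_alt s = PySem.Int.toStr ((s.toList.length : Int) -
      Mx (fun j => if tB (s.toList.map (fun c => c == '1')) j
          then ((min (j + 1) (s.toList.length - 1 - j) : Nat) : Int) else 0)
        (s.toList.length - 1)) := by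
  simp only [solve_alt, List.length_map]
  set cs := s.toList.map (fun c => c == '1') with hcs
  set m := s.toList.length with hm
  congr 1
  have htn : (((m : Int)) - 1 - 0).toNat = m - 1 := by omega
  rw [PySem.List.pyRange_one, htn, List.foldl_map]
  rw [PySem.List.foldl_congr_mem (g := fun idx (j : Nat) =>
    if tB cs j then max idx ((min (j + 1) (m - 1 - j) : Nat) : Int) else idx)]
  · rw [maxupd_eq_Mx]
  · intro acc j hj
    have hjm : j < m - 1 := List.mem_range.mp hj
    have h1 : (0 : Int) + (j : Int) = ((j : Nat) : Int) := by omega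
    have h2 : ((j : Int)) + 1 = ((j + 1 : Nat) : Int) := by push_cast; ring
    have h3 : min (((j + 1 : Nat)) : Int) ((m : Int) - 1 - (j : Int))
        = ((min (j + 1) (m - 1 - j) : Nat) : Int) := by
      push_cast; omega
    simp only [h1, h2, PySem.List.pyGetD_natCast, h3, tB]
    rfl

-- ===== VERDICT (by name: the statement is the Claim_ definition above) =====
theorem solve_spec : Claim_equal_solve := by
  intro s _
  unfold Spec_solve
  rw [solve_eq, solve_alt_eq]
  have h := core_eq (s.toList.map (fun c => c == '1'))
  simp only [List.length_map] at h
  rw [h]
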